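-- pv_equiv track=rewrite | github.com/Rainnylxy/mal_update_detect | extract_package_chain_eval.py | classify_chain_type
-- ===== SOURCE A (Python) =====
-- from typing import Dict, List, Optional, Tuple
--
-- LABEL_B = "Benign"
--
-- LABEL_U = "Undetermined"
--
-- LABEL_C = "Core Attack Chain"
--
-- LABEL_F = "Full Attack Chain"
--
-- def classify_chain_type(states: List[str]) -> str:
--     has_b = LABEL_B in states
--     has_u = LABEL_U in states
--     has_bu = has_b or has_u
--     has_c = LABEL_C in states
--     has_f = LABEL_F in states
--
--     if states and all(s == LABEL_C for s in states):
--         return "all_core"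
--     if states and all(s == LABEL_F for s in states):
--         return "all_full"
--     if states and all(s in (LABEL_B, LABEL_U) for s in states):
--         return "all_benign_or_undetermined"
--
--     if has_c and not has_f:
--         return "benign_or_undetermined_to_core"
--     if has_f and not has_c:
--         return "benign_or_undetermined_to_full"
--
--     first_c = next((i for i, s in enumerate(states) if s == LABEL_C), None)
--     first_f = next((i for i, s in enumerate(states) if s == LABEL_F), None)
--     first_cf = min(i for i in [first_c, first_f] if i is not None)
--     bu_before = any(s in (LABEL_B, LABEL_U) for s in states[:first_cf])
--     c_before_f = first_c is not None and first_f is not None and first_c < first_f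
--
--     if bu_before and c_before_f:
--         return "benign_or_undetermined_to_core_to_full"
--     if bu_before and not c_before_f:
--         return "benign_or_undetermined_to_full_then_core"
--     if not bu_before and c_before_f:
--         return "core_to_full_no_bu"
--     return "full_then_core_no_bu"
-- ===== SOURCE B (Python) =====
-- LABEL_B = "Benign"
-- LABEL_U = "Undetermined"
-- LABEL_C = "Core Attack Chain"
-- LABEL_F = "Full Attack Chain"
--
-- def classify_chain_type(states):
--     n = count_c = count_f = count_bu = 0
--     seen_c = seen_f = c_first = bu_before = False
--     for s in states:
--         n += 1
--         if s == LABEL_C: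
--             count_c += 1
--             if not seen_f:
--                 c_first = True
--             seen_c = True
--         elif s == LABEL_F:
--             count_f += 1
--             seen_f = True
--         elif s in (LABEL_B, LABEL_U):
--             count_bu += 1
--             if not seen_c and not seen_f:
--                 bu_before = True
--     if n and count_c == n:
--         return "all_core"
--     if n and count_f == n:
--         return "all_full"
--     if n and count_bu == n:
--         return "all_benign_or_undetermined"
--     if count_c and not count_f:
--         return "benign_or_undetermined_to_core"
--     if count_f and not count_c:
--         return "benign_or_undetermined_to_full"
--     if not count_c and not count_f:
--         raise ValueError("no core/full attack chain labels")
--     if bu_before and c_first: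
--         return "benign_or_undetermined_to_core_to_full"
--     if bu_before:
--         return "benign_or_undetermined_to_full_then_core"
--     if c_first:
--         return "core_to_full_no_bu"
--     return "full_then_core_no_bu"
-- ===== Notes on version B (the rewrite author's own statement) =====
-- stated objective: simpler
-- what changed: Replaced A's multiple whole-list scans (five membership/all() passes, two enumerate searches, a min, and a slice re-scan) by a single left-to-right pass that accumulates counts and order flags, then classifies from those values.
import Mathlib
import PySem

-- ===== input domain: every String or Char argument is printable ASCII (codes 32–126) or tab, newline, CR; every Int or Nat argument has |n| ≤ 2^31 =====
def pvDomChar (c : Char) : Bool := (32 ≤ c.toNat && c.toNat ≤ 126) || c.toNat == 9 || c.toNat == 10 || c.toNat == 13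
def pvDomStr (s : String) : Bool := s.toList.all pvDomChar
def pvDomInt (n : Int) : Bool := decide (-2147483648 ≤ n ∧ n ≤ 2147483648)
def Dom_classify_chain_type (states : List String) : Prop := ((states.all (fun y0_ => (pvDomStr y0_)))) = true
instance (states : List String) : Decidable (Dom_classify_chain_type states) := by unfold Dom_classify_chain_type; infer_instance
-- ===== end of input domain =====

-- B replaces A's multiple whole-list scans and index/slice arithmetic by a single left-to-right
-- pass accumulating counts and order flags (objective: simpler one-pass decomposition).

-- ===== PORT A =====
-- next((i for i, s in enumerate(states) if s == lbl), None)
def pyFirstIdx (l : List String) (lbl : String) : Option Nat :=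
  match l with
  | [] => none
  | s :: t => if s == lbl then some 0 else (pyFirstIdx t lbl).map (· + 1)

-- min(i for i in xs if i is not None); Python raises on empty — 0 here is unreachable under Pre_
def pyMinSome (xs : List (Option Nat)) : Nat :=
  match xs.filterMap id with
  | [] => 0
  | x :: rest => rest.foldl min x

def classify_chain_type (states : List String) : String :=
  let has_b := "Benign" ∈ states
  let has_u := "Undetermined" ∈ states
  let _has_bu := has_b ∨ has_u
  let has_c := "Core Attack Chain" ∈ states
  let has_f := "Full Attack Chain" ∈ states
  if states ≠ [] ∧ ∀ s ∈ states, s = "Core Attack Chain" then "all_core"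
  else if states ≠ [] ∧ ∀ s ∈ states, s = "Full Attack Chain" then "all_full"
  else if states ≠ [] ∧ ∀ s ∈ states, s = "Benign" ∨ s = "Undetermined" then "all_benign_or_undetermined"
  else if has_c ∧ ¬ has_f then "benign_or_undetermined_to_core"
  else if has_f ∧ ¬ has_c then "benign_or_undetermined_to_full"
  else
    let first_c := pyFirstIdx states "Core Attack Chain"
    let first_f := pyFirstIdx states "Full Attack Chain"
    let first_cf := pyMinSome [first_c, first_f]
    let bu_before := (states.take first_cf).any (fun s => s == "Benign" || s == "Undetermined")
    let c_before_f := first_c.isSome && first_f.isSome && decide (first_c.getD 0 < first_f.getD 0)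
    if bu_before && c_before_f then "benign_or_undetermined_to_core_to_full"
    else if bu_before && !c_before_f then "benign_or_undetermined_to_full_then_core"
    else if !bu_before && c_before_f then "core_to_full_no_bu"
    else "full_then_core_no_bu"

-- ===== PORT B =====
structure BAcc where
  n : Nat
  c : Nat
  f : Nat
  bu : Nat
  seen_c : Bool
  seen_f : Bool
  c_first : Bool
  bu_before : Bool
deriving Repr, DecidableEq

def bStep (a : BAcc) (s : String) : BAcc :=
  let a := { a with n := a.n + 1 }
  if s == "Core Attack Chain" then
    { a with c := a.c + 1, c_first := a.c_first || !a.seen_f, seen_c := true }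
  else if s == "Full Attack Chain" then
    { a with f := a.f + 1, seen_f := true }
  else if s == "Benign" || s == "Undetermined" then
    { a with bu := a.bu + 1, bu_before := a.bu_before || (!a.seen_c && !a.seen_f) }
  else a

def bLoop : List String → BAcc → BAcc
  | [], a => a
  | s :: t, a => bLoop t (bStep a s)

def classify_chain_type_alt (states : List String) : String :=
  let r := bLoop states ⟨0, 0, 0, 0, false, false, false, false⟩
  if r.n ≠ 0 ∧ r.c = r.n then "all_core"
  else if r.n ≠ 0 ∧ r.f = r.n then "all_full"
  else if r.n ≠ 0 ∧ r.bu = r.n then "all_benign_or_undetermined"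
  else if r.c ≠ 0 ∧ r.f = 0 then "benign_or_undetermined_to_core"
  else if r.f ≠ 0 ∧ r.c = 0 then "benign_or_undetermined_to_full"
  else if r.c = 0 ∧ r.f = 0 then ""  -- Python B raises ValueError here; unreachable under Pre_
  else if r.bu_before && r.c_first then "benign_or_undetermined_to_core_to_full"
  else if r.bu_before then "benign_or_undetermined_to_full_then_core"
  else if r.c_first then "core_to_full_no_bu"
  else "full_then_core_no_bu"

-- ===== PRECONDITION & SPEC =====
-- Pre_ excludes exactly the inputs on which Python A raises ValueError (min of an empty
-- generator): lists containing neither "Core Attack Chain" nor "Full Attack Chain", except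
-- nonempty lists made only of "Benign"/"Undetermined".
def Pre_classify_chain_type (states : List String) : Prop :=
  "Core Attack Chain" ∈ states ∨ "Full Attack Chain" ∈ states ∨
    (states ≠ [] ∧ ∀ s ∈ states, s = "Benign" ∨ s = "Undetermined")
instance (states : List String) : Decidable (Pre_classify_chain_type states) := by
  unfold Pre_classify_chain_type; infer_instance
def pvWitness_classify_chain_type : List String := ["Benign", "Core Attack Chain"]

def Spec_classify_chain_type (states : List String) (out : String) : Prop := out = classify_chain_type_alt states
instance (states : List String) (out : String) : Decidable (Spec_classify_chain_type states out) := by unfold Spec_classify_chain_type; infer_instance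

-- ===== CLAIM (what is proved, stated in full; the proofs are below) =====
def Claim_equal_classify_chain_type : Prop := ∀ (states : List String), Dom_classify_chain_type states → Pre_classify_chain_type states → Spec_classify_chain_type states (classify_chain_type states)

-- ===== LEMMAS AND PROOFS =====

-- spec of the c_first flag: the first Core/Full label occurring in the list is Core
def cFirstSpec : List String → Bool
  | [] => false
  | s :: t => if s = "Core Attack Chain" then true
              else if s = "Full Attack Chain" then false
              else cFirstSpec t

-- spec of the bu_before flag: some Benign/Undetermined occurs before any Core/Full label
def buBeforeSpec : List String → Bool
  | [] => false
  | s :: t => if s = "Core Attack Chain" ∨ s = "Full Attack Chain" then false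
              else (s = "Benign" || s = "Undetermined") || buBeforeSpec t

theorem bLoop_char (l : List String) (a : BAcc) :
    bLoop l a =
      { n := a.n + l.length,
        c := a.c + l.count "Core Attack Chain",
        f := a.f + l.count "Full Attack Chain",
        bu := a.bu + l.countP (fun s => s == "Benign" || s == "Undetermined"),
        seen_c := a.seen_c || l.contains "Core Attack Chain",
        seen_f := a.seen_f || l.contains "Full Attack Chain",
        c_first := a.c_first || (!a.seen_f && cFirstSpec l),
        bu_before := a.bu_before || (!a.seen_c && !a.seen_f && buBeforeSpec l) } := by
  induction l generalizing a with
  | nil => simp [bLoop, cFirstSpec, buBeforeSpec]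
  | cons s t ih =>
    simp only [bLoop, ih, bStep]
    by_cases hc : s = "Core Attack Chain"
    · subst hc
      cases a.c_first <;> cases a.seen_f <;>
        simp [List.count_cons, List.countP_cons, cFirstSpec, buBeforeSpec] <;> omega
    · by_cases hf : s = "Full Attack Chain"
      · subst hf
        cases a.seen_c <;> cases a.seen_f <;>
          simp [List.count_cons, List.countP_cons, cFirstSpec, buBeforeSpec, hc] <;> omega
      · by_cases hbu : s = "Benign" ∨ s = "Undetermined"
        · have hb : (s == "Benign" || s == "Undetermined") = true := by
            rcases hbu with h | h <;> simp [h]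
          cases a.seen_c <;> cases a.seen_f <;> cases a.bu_before <;>
            simp [List.count_cons, List.countP_cons, cFirstSpec, buBeforeSpec, hc, hf, hb,
              hbu, Ne.symm hc, Ne.symm hf] <;> omega
        · simp only [not_or] at hbu
          have hb : (s == "Benign" || s == "Undetermined") = false := by
            simp [hbu.1, hbu.2]
          simp [List.count_cons, List.countP_cons, cFirstSpec, buBeforeSpec, hc, hf, hb,
            hbu.1, hbu.2, Ne.symm hc, Ne.symm hf, Ne.symm hbu.1, Ne.symm hbu.2]
          omega

theorem pyFirstIdx_some_of_mem (l : List String) (lbl : String) (h : lbl ∈ l) :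
    ∃ k, pyFirstIdx l lbl = some k := by
  induction l with
  | nil => simp at h
  | cons s t ih =>
    by_cases hs : s = lbl
    · exact ⟨0, by simp [pyFirstIdx, hs]⟩
    · have : lbl ∈ t := by
        rcases List.mem_cons.mp h with h' | h'
        · exact absurd h'.symm hs
        · exact h'
      obtain ⟨k, hk⟩ := ih this
      exact ⟨k + 1, by simp [pyFirstIdx, hs, hk]⟩

theorem cFirst_lt (l : List String) (i j : Nat)
    (hi : pyFirstIdx l "Core Attack Chain" = some i)
    (hj : pyFirstIdx l "Full Attack Chain" = some j) :
    cFirstSpec l = decide (i < j) := by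
  induction l generalizing i j with
  | nil => simp [pyFirstIdx] at hi
  | cons s t ih =>
    by_cases hc : s = "Core Attack Chain"
    · subst hc
      simp [pyFirstIdx] at hi hj
      obtain ⟨j', hj', rfl⟩ := hj
      simp [cFirstSpec, ← hi]
    · by_cases hf : s = "Full Attack Chain"
      · subst hf
        simp [pyFirstIdx, hc] at hi hj
        obtain ⟨i', hi', rfl⟩ := hi
        simp [cFirstSpec, hc, ← hj]
      · simp [pyFirstIdx, hc, hf] at hi hj
        obtain ⟨i', hi', rfl⟩ := hi
        obtain ⟨j', hj', rfl⟩ := hj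
        simp [cFirstSpec, hc, hf, ih i' j' hi' hj']

theorem buBefore_take (l : List String) (i j : Nat)
    (hi : pyFirstIdx l "Core Attack Chain" = some i)
    (hj : pyFirstIdx l "Full Attack Chain" = some j) :
    (l.take (min i j)).any (fun s => s == "Benign" || s == "Undetermined") = buBeforeSpec l := by
  induction l generalizing i j with
  | nil => simp [pyFirstIdx] at hi
  | cons s t ih =>
    by_cases hc : s = "Core Attack Chain"
    · subst hc
      simp [pyFirstIdx] at hi
      simp [← hi, buBeforeSpec]
    · by_cases hf : s = "Full Attack Chain"
      · subst hf
        simp [pyFirstIdx, hc] at hj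
        simp [← hj, buBeforeSpec, hc]
      · simp [pyFirstIdx, hc, hf] at hi hj
        obtain ⟨i', hi', rfl⟩ := hi
        obtain ⟨j', hj', rfl⟩ := hj
        have : min (i' + 1) (j' + 1) = min i' j' + 1 := by omega
        by_cases hbB : s = "Benign" <;> by_cases hbU : s = "Undetermined" <;>
          simp [this, buBeforeSpec, hc, hf, hbB, hbU, ih i' j' hi' hj']

set_option maxHeartbeats 2000000 in
theorem classify_chain_type_spec : Claim_equal_classify_chain_type := by
  intro states _ hpre
  unfold Spec_classify_chain_type
  have hne : (states.length ≠ 0 ∧ states.count "Core Attack Chain" = states.length) ↔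
      (states ≠ [] ∧ ∀ s ∈ states, s = "Core Attack Chain") := by
    rw [List.count_eq_length]
    simp [List.length_eq_zero_iff, eq_comm]
  have hnf : (states.length ≠ 0 ∧ states.count "Full Attack Chain" = states.length) ↔
      (states ≠ [] ∧ ∀ s ∈ states, s = "Full Attack Chain") := by
    rw [List.count_eq_length]
    simp [List.length_eq_zero_iff, eq_comm]
  have hnbu : (states.length ≠ 0 ∧
      states.countP (fun s => s == "Benign" || s == "Undetermined") = states.length) ↔
      (states ≠ [] ∧ ∀ s ∈ states, s = "Benign" ∨ s = "Undetermined") := by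
    rw [List.countP_eq_length]
    simp [List.length_eq_zero_iff]
  have hcz : (states.count "Core Attack Chain" ≠ 0) ↔ "Core Attack Chain" ∈ states := by
    simp [Nat.pos_iff_ne_zero.symm, List.count_pos_iff]
  have hfz : (states.count "Full Attack Chain" ≠ 0) ↔ "Full Attack Chain" ∈ states := by
    simp [Nat.pos_iff_ne_zero.symm, List.count_pos_iff]
  have hcz0 : (states.count "Core Attack Chain" = 0) ↔ ¬ "Core Attack Chain" ∈ states := by
    simp [List.count_eq_zero]
  have hfz0 : (states.count "Full Attack Chain" = 0) ↔ ¬ "Full Attack Chain" ∈ states := by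
    simp [List.count_eq_zero]
  simp only [classify_chain_type, classify_chain_type_alt, bLoop_char, Nat.zero_add]
  simp only [Bool.false_or, Bool.not_false, Bool.true_and]
  simp only [hne, hnf, hnbu, hcz, hfz, hcz0, hfz0]
  by_cases h1 : states ≠ [] ∧ ∀ s ∈ states, s = "Core Attack Chain"
  · rw [if_pos h1, if_pos h1]
  rw [if_neg h1, if_neg h1]
  by_cases h2 : states ≠ [] ∧ ∀ s ∈ states, s = "Full Attack Chain"
  · rw [if_pos h2, if_pos h2]
  rw [if_neg h2, if_neg h2]
  by_cases h3 : states ≠ [] ∧ ∀ s ∈ states, s = "Benign" ∨ s = "Undetermined"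
  · rw [if_pos h3, if_pos h3]
  rw [if_neg h3, if_neg h3]
  by_cases h4 : "Core Attack Chain" ∈ states ∧ "Full Attack Chain" ∉ states
  · rw [if_pos h4, if_pos h4]
  rw [if_neg h4, if_neg h4]
  by_cases h5 : "Full Attack Chain" ∈ states ∧ "Core Attack Chain" ∉ states
  · rw [if_pos h5, if_pos h5]
  rw [if_neg h5, if_neg h5]
  -- all five guards false: the ordered-chain tail
  · have hcf : "Core Attack Chain" ∈ states ∧ "Full Attack Chain" ∈ states := by
      rcases hpre with h | h | h
      · refine ⟨h, ?_⟩; by_contra hf; exact h4 ⟨h, hf⟩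
      · refine ⟨?_, h⟩; by_contra hc; exact h5 ⟨h, hc⟩
      · exact absurd h h3
    rw [if_neg (show ¬("Core Attack Chain" ∉ states ∧ "Full Attack Chain" ∉ states) from
      fun h => h.1 hcf.1)]
    obtain ⟨i, hi⟩ := pyFirstIdx_some_of_mem states _ hcf.1
    obtain ⟨j, hj⟩ := pyFirstIdx_some_of_mem states _ hcf.2
    have hmin : pyMinSome [some i, some j] = min i j := by
      simp [pyMinSome, List.filterMap]
    simp only [hi, hj, hmin, Option.isSome_some, Option.getD_some, Bool.true_and,
      buBefore_take states i j hi hj, cFirst_lt states i j hi hj]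
    cases hb : buBeforeSpec states <;> rcases Nat.lt_or_ge i j with hij | hij <;>
      simp [hij, Nat.not_lt.mpr hij]
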